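-- pv_equiv track=rewrite | github.com/Lokeshsalunkhe22/Striver-100-Coding-Question-in-Python | string/23.word_with_hrw.py | word_with_highest_repeated_word
-- ===== SOURCE A (Python) =====
-- def word_with_highest_repeated_word(s):
--     words = s.split()
--
--     max_repeat = 1
--     max_word = ""
--
--     for word in words:
--         repeat = count_repeat(word)
--         if repeat > max_repeat:
--             max_repeat = repeat
--             max_word = word
--
--     if max_repeat > 1:
--         return max_word
--     else:
--         return -1
--
-- def count_repeat(word):
--     frequency = {}
--     for char in word:
--         if char in frequency:
--             frequency[char] += 1
--         else:
--             frequency[char] = 1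
--
--     return max(frequency.values())
-- ===== SOURCE B (Python) =====
-- def word_with_highest_repeated_word(s):
--     words = s.split()
--
--     max_repeat = 1
--     max_word = ""
--
--     for word in words:
--         repeat = count_repeat(word)
--         if repeat > max_repeat:
--             max_repeat = repeat
--             max_word = word
--
--     if max_repeat > 1:
--         return max_word
--     else:
--         return -1
--
-- def count_repeat(word):
--     # sort the characters: equal characters become adjacent, so the maximum
--     # character frequency is the longest run of equal consecutive characters
--     chars = sorted(word)
--     best = 1
--     run = 1
--     for prev, cur in zip(chars, chars[1:]):
--         if cur == prev:
--             run += 1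
--             if run > best:
--                 best = run
--         else:
--             run = 1
--     return best
-- ===== Notes on version B (the rewrite author's own statement) =====
-- stated objective: alternative
-- what changed: count_repeat no longer builds a frequency dict and takes the max of its values: B sorts the word's characters and scans the sorted sequence once for the longest run of equal adjacent characters (run-length encoding), which equals the maximum character frequency because sorting makes equal characters adjacent; the outer first-strict-max scan and the -1/word return semantics are kept.
-- outside the precondition, e.g. on word_with_highest_repeated_word('ab cd'): A returns -1, B returns -1
import Mathlib
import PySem

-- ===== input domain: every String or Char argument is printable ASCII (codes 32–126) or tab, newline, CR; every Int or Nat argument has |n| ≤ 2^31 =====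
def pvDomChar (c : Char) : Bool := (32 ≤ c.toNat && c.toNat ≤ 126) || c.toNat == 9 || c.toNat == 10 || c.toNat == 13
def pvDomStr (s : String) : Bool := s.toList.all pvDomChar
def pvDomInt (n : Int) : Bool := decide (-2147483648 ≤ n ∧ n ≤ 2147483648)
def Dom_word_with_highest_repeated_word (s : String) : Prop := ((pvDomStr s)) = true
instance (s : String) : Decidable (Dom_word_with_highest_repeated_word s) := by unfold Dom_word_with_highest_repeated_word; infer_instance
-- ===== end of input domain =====

-- B's count_repeat sorts the word's characters and takes the longest run of equal
-- adjacent characters instead of A's frequency dict + max(values); outer scan unchanged.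


-- ===== PORT A =====
-- count_repeat: frequency dict built char by char, then max(frequency.values()).
-- Words come from s.split() hence are nonempty, so the values list is nonempty and
-- the .getD 0 default of max? is never used (Python's max would raise only on "").
def pvCountRepeat (word : String) : Int :=
  let frequency := word.toList.foldl
    (fun (d : PySem.Dict Char Int) c =>
      if d.contains c then d.insert c (d.getD c 0 + 1) else d.insert c 1)
    PySem.Dict.empty
  (PySem.List.max? frequency.values (fun x => x)).getD 0

def word_with_highest_repeated_word (s : String) : String :=
  let words := PySem.Str.split₀ s
  let st := words.foldl
    (fun (st : Int × String) word =>
      let r := pvCountRepeat word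
      if r > st.1 then (r, word) else st)
    (1, "")
  -- Python returns the int -1 when max_repeat ≤ 1: not a String; those inputs are outside Pre_
  if st.1 > 1 then st.2 else ""

-- ===== PORT B =====
-- count_repeat: sort the characters, then scan zip(chars, chars[1:]) for the longest
-- run of equal adjacent characters (best, run accumulator); .getD 0 style default unused
def pvCountRepeatAlt (word : String) : Int :=
  let chars := PySem.List.sorted word.toList (fun c => c) false
  let st := (chars.zip (PySem.List.slice chars (some 1) none)).foldl
    (fun (st : Int × Int) p =>
      if p.2 == p.1 then
        let run := st.2 + 1
        (if run > st.1 then run else st.1, run)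
      else (st.1, 1))
    (1, 1)
  st.1

def word_with_highest_repeated_word_alt (s : String) : String :=
  let words := PySem.Str.split₀ s
  let st := words.foldl
    (fun (st : Int × String) word =>
      let r := pvCountRepeatAlt word
      if r > st.1 then (r, word) else st)
    (1, "")
  -- Python returns the int -1 when max_repeat ≤ 1: not a String; those inputs are outside Pre_
  if st.1 > 1 then st.2 else ""

-- ===== PRECONDITION & SPEC =====
-- Pre_ excludes exactly the inputs where no word contains a repeated character: there A
-- (and B) return the int -1, which is not a value of the declared String return type.
def Pre_word_with_highest_repeated_word (s : String) : Prop :=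
  ((PySem.Str.split₀ s).any (fun w => w.toList.any (fun c => 2 ≤ w.toList.count c))) = true
instance (s : String) : Decidable (Pre_word_with_highest_repeated_word s) := by
  unfold Pre_word_with_highest_repeated_word; infer_instance

def pvWitness_word_with_highest_repeated_word : String := "hello world"

def Spec_word_with_highest_repeated_word (s : String) (out : String) : Prop := out = word_with_highest_repeated_word_alt s
instance (s : String) (out : String) : Decidable (Spec_word_with_highest_repeated_word s out) := by unfold Spec_word_with_highest_repeated_word; infer_instance

-- ===== CLAIM (what is proved, stated in full; the proofs are below) =====
def Claim_equal_word_with_highest_repeated_word : Prop := ∀ (s : String), Dom_word_with_highest_repeated_word s → Pre_word_with_highest_repeated_word s → Spec_word_with_highest_repeated_word s (word_with_highest_repeated_word s)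

-- ===== LEMMAS AND PROOFS =====

-- the canonical value both count_repeat's compute on a nonempty word: the max character count
def pvFmax (l : List Int) : Int := l.foldl max 0

theorem pvFmax_congr (l₁ l₂ : List Int) (h : ∀ x, x ∈ l₁ ↔ x ∈ l₂) : pvFmax l₁ = pvFmax l₂ := by
  have le : ∀ (p q : List Int), (∀ x ∈ p, x ∈ q) → pvFmax p ≤ pvFmax q := by
    intro p q hpq
    rcases PySem.List.foldl_max_mem p 0 with h0 | hm
    · rw [pvFmax, h0]; exact (PySem.List.le_foldl_max q 0).1
    · exact (PySem.List.le_foldl_max q 0).2 _ (hpq _ hm)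
  exact le_antisymm (le _ _ fun x hx => (h x).1 hx) (le _ _ fun x hx => (h x).2 hx)

theorem pvFmax_cons_nonneg (v : Int) (l : List Int) (hv : 0 ≤ v) :
    pvFmax (v :: l) = l.foldl max v := by
  show List.foldl max (max 0 v) l = _
  rw [max_eq_right hv]

theorem pv_foldl_max_shift (l : List Int) (a : Int) : ∀ b, l.foldl max (max a b) = max a (l.foldl max b) := by
  induction l with
  | nil => intro b; rfl
  | cons x xs ih =>
      intro b
      show xs.foldl max (max (max a b) x) = max a (xs.foldl max (max b x))
      rw [max_assoc, ih]

theorem pv_foldl_max_replicate (m : Nat) (v : Int) : (List.replicate m v).foldl max v = v := by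
  induction m with
  | zero => rfl
  | succ n ih => simpa [List.replicate_succ] using ih

-- ===== A side: pvCountRepeat = pvFmax of the char counts =====

theorem pv_freq_eq_counter (xs : List Char) :
    xs.foldl
      (fun (d : PySem.Dict Char Int) c =>
        if d.contains c then d.insert c (d.getD c 0 + 1) else d.insert c 1)
      PySem.Dict.empty = PySem.Dict.counter xs := by
  rw [← PySem.Dict.foldl_insert_getD_add_one_eq_counter]
  have h : (fun (d : PySem.Dict Char Int) c =>
      if d.contains c then d.insert c (d.getD c 0 + 1) else d.insert c 1)
      = fun (d : PySem.Dict Char Int) c => d.insert c (d.getD c 0 + 1) := by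
    funext d c
    by_cases h : d.contains c
    · simp [h]
    · have hc : d.contains c = false := by simpa using h
      rw [PySem.Dict.getD_of_not_contains d 0 hc]; simp [hc]
  rw [h]

theorem pv_countRepeat_eq_fmax (w : String) (hw : w.toList ≠ []) :
    pvCountRepeat w = pvFmax (w.toList.map (fun c => (w.toList.count c : Int))) := by
  unfold pvCountRepeat
  rw [pv_freq_eq_counter]
  have hv : (PySem.Dict.counter w.toList).values
      = (PySem.Set.ofList w.toList).map (fun k => ((w.toList.count k : Nat) : Int)) := by
    simp [PySem.Dict.values, PySem.Dict.items_counter, List.map_map, Function.comp]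
  show (PySem.List.max? (PySem.Dict.counter w.toList).values fun x => x).getD 0 = _
  rw [hv]
  cases hS : PySem.Set.ofList w.toList with
  | nil =>
      exfalso
      cases hl : w.toList with
      | nil => exact hw hl
      | cons c tl =>
          have : c ∈ PySem.Set.ofList w.toList := by
            rw [PySem.Set.mem_ofList, hl]; exact List.mem_cons_self
          rw [hS] at this; exact (List.not_mem_nil).elim this
  | cons y ys =>
      rw [List.map_cons, PySem.List.max?_id_cons, Option.getD_some,
          ← pvFmax_cons_nonneg _ _ (Int.natCast_nonneg _)]
      apply pvFmax_congr
      intro v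
      constructor
      · intro hv'
        rcases List.mem_cons.mp hv' with h | h
        · subst h
          exact List.mem_map.mpr ⟨y, by
            have : y ∈ PySem.Set.ofList w.toList := by rw [hS]; exact List.mem_cons_self
            exact ⟨(PySem.Set.mem_ofList _ _).mp this, rfl⟩⟩
        · rcases List.mem_map.mp h with ⟨k, hk, rfl⟩
          exact List.mem_map.mpr ⟨k, by
            have : k ∈ PySem.Set.ofList w.toList := by rw [hS]; exact List.mem_cons_of_mem _ hk
            exact ⟨(PySem.Set.mem_ofList _ _).mp this, rfl⟩⟩
      · intro hv'
        rcases List.mem_map.mp hv' with ⟨k, hk, rfl⟩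
        have : k ∈ PySem.Set.ofList w.toList := (PySem.Set.mem_ofList _ _).mpr hk
        rw [hS] at this
        rcases List.mem_cons.mp this with h | h
        · subst h; exact List.mem_cons_self
        · exact List.mem_cons_of_mem _ (List.mem_map.mpr ⟨k, h, rfl⟩)

-- ===== B side: run scan on the sorted characters =====

-- the fold of B's loop, structurally (prev = previous character)
def pvP (st : Int × Int) : Char → List Char → Int × Int
  | _, [] => st
  | prev, c :: cs =>
      pvP (if c == prev then
             (if st.2 + 1 > st.1 then st.2 + 1 else st.1, st.2 + 1)
           else (st.1, 1)) c cs

-- pure longest-run-from-here value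
def pvPure : Char → Int → List Char → Int
  | _, run, [] => run
  | prev, run, c :: cs => if c = prev then pvPure c (run + 1) cs else max (pvPure c 1 cs) run

theorem pv_zip_foldl_eq_pvP (cs : List Char) : ∀ (a : Char) (st : Int × Int),
    ((a :: cs).zip cs).foldl
      (fun (st : Int × Int) p =>
        if p.2 == p.1 then
          (if st.2 + 1 > st.1 then st.2 + 1 else st.1, st.2 + 1)
        else (st.1, 1)) st = pvP st a cs := by
  induction cs with
  | nil => intro a st; rfl
  | cons c cs ih =>
      intro a st
      show ((c :: cs).zip cs).foldl _ _ = _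
      rw [ih]
      rfl

theorem pv_pure_ge (cs : List Char) : ∀ (prev : Char) (run : Int), run ≤ pvPure prev run cs := by
  induction cs with
  | nil => intro prev run; exact le_refl _
  | cons c cs ih =>
      intro prev run
      show run ≤ if c = prev then pvPure c (run + 1) cs else max (pvPure c 1 cs) run
      split_ifs
      · exact le_trans (by omega) (ih c (run + 1))
      · exact le_max_right _ _

theorem pv_pvP_fst (cs : List Char) : ∀ (prev : Char) (st : Int × Int),
    1 ≤ st.2 → st.2 ≤ st.1 → (pvP st prev cs).1 = max st.1 (pvPure prev st.2 cs) := by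
  induction cs with
  | nil =>
      intro prev st h1 h2
      show st.1 = max st.1 st.2
      omega
  | cons c cs ih =>
      intro prev st h1 h2
      show (pvP (if c == prev then _ else _) c cs).1 = max st.1 (if c = prev then _ else _)
      by_cases hc : c = prev
      · have hb : (c == prev) = true := by simp [hc]
        rw [if_pos hb, if_pos hc]
        rw [ih c _ (by simp; omega) (by simp; omega)]
        have hge := pv_pure_ge cs c (st.2 + 1)
        simp only []
        split_ifs <;> omega
      · have hb : (c == prev) = false := by simp [hc]
        rw [if_neg (by simp [hb]), if_neg hc]
        rw [ih c _ (by simp) (by simp; omega)]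
        show max st.1 (pvPure c 1 cs) = max st.1 (max (pvPure c 1 cs) st.2)
        omega

theorem pv_pure_replicate (t : List Char) (c : Char) : ∀ (m : Nat) (run : Int),
    pvPure c run (List.replicate m c ++ t) = pvPure c (run + m) t := by
  intro m
  induction m with
  | zero => intro run; simp
  | succ n ih =>
      intro run
      rw [List.replicate_succ, List.cons_append]
      show (if c = c then pvPure c (run + 1) (List.replicate n c ++ t) else _) = _
      rw [if_pos rfl, ih]
      congr 1
      push_cast
      ring

-- the heart: on a sorted list c :: cs, the longest-run scan computes the max char count
theorem pv_pure_sorted : ∀ (n : Nat) (c : Char) (cs : List Char), cs.length ≤ n →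
    List.Pairwise (· ≤ ·) (c :: cs) →
    pvPure c 1 cs = pvFmax ((c :: cs).map (fun x => (((c :: cs).count x : Nat) : Int))) := by
  intro n
  induction n with
  | zero =>
      intro c cs hlen hp
      have hnil : cs = [] := List.eq_nil_of_length_eq_zero (Nat.le_zero.mp hlen)
      subst hnil
      simp [pvPure, pvFmax]
  | succ n ih =>
      intro c cs hlen hp
      have htake : cs.takeWhile (fun x => x == c)
          = List.replicate (cs.takeWhile (fun x => x == c)).length c := by
        rw [List.eq_replicate_iff]
        refine ⟨rfl, ?_⟩
        intro b hb
        simpa using List.mem_takeWhile_imp hb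
      set m := (cs.takeWhile (fun x => x == c)).length with hm
      set t := cs.dropWhile (fun x => x == c) with ht
      have hsplit : cs = List.replicate m c ++ t := by
        conv_lhs => rw [← List.takeWhile_append_dropWhile (p := fun x => x == c) (l := cs)]
        rw [htake]
      cases htc : t with
      | nil =>
          have hcs : cs = List.replicate m c := by rw [hsplit, htc, List.append_nil]
          have hccs : c :: cs = List.replicate (m + 1) c := by
            rw [List.replicate_succ, hcs]
          rw [hccs]
          have hcount : (List.replicate (m + 1) c).count c = m + 1 := by
            simp
          have hmap : (List.replicate (m + 1) c).map
              (fun x => (((List.replicate (m + 1) c).count x : Nat) : Int))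
              = List.replicate (m + 1) ((m + 1 : Nat) : Int) := by
            rw [List.map_replicate, hcount]
          rw [hmap, List.replicate_succ, pvFmax_cons_nonneg _ _ (Int.natCast_nonneg _),
              pv_foldl_max_replicate]
          have : pvPure c 1 cs = pvPure c (1 + (m : Int)) [] := by
            rw [hcs]
            have := pv_pure_replicate [] c m 1
            simpa using this
          rw [this]
          show 1 + (m : Int) = ((m + 1 : Nat) : Int)
          push_cast; ring
      | cons d ds =>
          have hd : (d == c) = false := by
            have h1 : (cs.dropWhile (fun x => x == c)).head? = some d := by
              rw [← ht, htc]; rfl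
            have := List.head?_dropWhile_not (fun x => x == c) cs
            simp [h1] at this
            simpa using this
          have hdc : d ≠ c := by simpa using hd
          have hsub : t.Sublist cs := ht ▸ List.dropWhile_sublist _
          have hpcs : List.Pairwise (· ≤ ·) cs := hp.of_cons
          have hpt : List.Pairwise (· ≤ ·) (d :: ds) := htc ▸ (hpcs.sublist hsub)
          have hclec : ∀ x ∈ cs, c ≤ x := fun x hx => List.rel_of_pairwise_cons hp hx
          have hdcs : d ∈ cs := hsub.subset (htc ▸ List.mem_cons_self)
          have hcd : c < d := lt_of_le_of_ne (hclec d hdcs) (Ne.symm hdc)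
          have hct : c ∉ t := by
            rw [htc]
            intro hc
            rcases List.mem_cons.mp hc with h | h
            · exact hdc h.symm
            · exact absurd (List.rel_of_pairwise_cons hpt h) (not_le.mpr hcd)
          -- LHS: the run scan splits at the replicate/t boundary
          have hlhs : pvPure c 1 cs = max (pvPure d 1 ds) (1 + (m : Int)) := by
            rw [hsplit, pv_pure_replicate, htc]
            show (if d = c then pvPure d (1 + (m : Int) + 1) ds
                  else max (pvPure d 1 ds) (1 + (m : Int))) = _
            rw [if_neg hdc]
          have hlent : ds.length ≤ n := by
            have h1 : cs.length = m + t.length := by rw [hsplit]; simp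
            rw [htc] at h1; simp at h1
            omega
          have hih := ih d ds hlent hpt
          -- counts in c :: cs versus counts in t
          have hcount_c : (c :: cs).count c = m + 1 := by
            rw [hsplit]
            have h0 : t.count c = 0 := List.count_eq_zero.mpr hct
            simp [List.count_append, h0]
          have hcount_t : ∀ x ∈ t, (c :: cs).count x = t.count x := by
            intro x hx
            have hxc : x ≠ c := fun h => hct (h ▸ hx)
            rw [hsplit]
            simp [List.count_append, List.count_replicate, Ne.symm hxc]
          -- the value lists have the same members
          have hmem : ∀ v : Int,
              v ∈ (c :: cs).map (fun x => (((c :: cs).count x : Nat) : Int)) ↔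
              v ∈ ((m + 1 : Nat) : Int) :: t.map (fun x => ((t.count x : Nat) : Int)) := by
            intro v
            constructor
            · intro hv
              rcases List.mem_map.mp hv with ⟨y, hy, rfl⟩
              by_cases hyc : y = c
              · subst hyc
                rw [hcount_c]
                exact List.mem_cons_self
              · have hyt : y ∈ t := by
                  rcases List.mem_cons.mp hy with h | h
                  · exact absurd h hyc
                  · rw [hsplit] at h
                    rcases List.mem_append.mp h with h' | h'
                    · exact absurd (List.eq_of_mem_replicate h') hyc
                    · exact h'
                exact List.mem_cons_of_mem _
                  (List.mem_map.mpr ⟨y, hyt, by rw [hcount_t y hyt]⟩)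
            · intro hv
              rcases List.mem_cons.mp hv with h | h
              · subst h
                exact List.mem_map.mpr ⟨c, List.mem_cons_self, by rw [hcount_c]⟩
              · rcases List.mem_map.mp h with ⟨y, hy, rfl⟩
                refine List.mem_map.mpr ⟨y, ?_, by rw [hcount_t y hy]⟩
                exact List.mem_cons_of_mem _ (hsub.subset hy)
          rw [hlhs, hih, ← htc,
              pvFmax_congr _ _ hmem,
              pvFmax_cons_nonneg _ _ (Int.natCast_nonneg _)]
          have hshift : (t.map (fun x => ((t.count x : Nat) : Int))).foldl max ((m + 1 : Nat) : Int)
              = max ((m + 1 : Nat) : Int) (pvFmax (t.map (fun x => ((t.count x : Nat) : Int)))) := by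
            rw [show ((m + 1 : Nat) : Int) = max ((m + 1 : Nat) : Int) 0 from
                  (max_eq_left (Int.natCast_nonneg _)).symm,
                pv_foldl_max_shift]
            rfl
          rw [hshift]
          have := Int.natCast_nonneg (m + 1)
          push_cast
          omega

theorem pv_countRepeatAlt_eq_fmax (w : String) (hw : w.toList ≠ []) :
    pvCountRepeatAlt w = pvFmax (w.toList.map (fun c => (w.toList.count c : Int))) := by
  unfold pvCountRepeatAlt
  cases hc : PySem.List.sorted w.toList (fun c => c) false with
  | nil => exact absurd ((PySem.List.sorted_eq_nil_iff _ _ _).mp hc) hw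
  | cons a cs =>
      show (((a :: cs).zip (PySem.List.slice (a :: cs) (some 1) none)).foldl _ (1, 1)).1 = _
      rw [PySem.List.slice_from_one]
      show (((a :: cs).zip cs).foldl _ (1, 1)).1 = _
      rw [pv_zip_foldl_eq_pvP, pv_pvP_fst cs a (1, 1) (le_refl 1) (le_refl 1)]
      have h1 : (1 : Int) ≤ pvPure a 1 cs := pv_pure_ge cs a 1
      rw [max_eq_right h1]
      have hpair : List.Pairwise (· ≤ ·) (a :: cs) := by
        have := PySem.List.sorted_pairwise (xs := w.toList) (key := fun c => c)
        rw [hc] at this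
        exact this
      rw [pv_pure_sorted cs.length a cs (le_refl _) hpair, ← hc]
      have hcnt : (fun x => (((PySem.List.sorted w.toList (fun c => c) false).count x : Nat) : Int))
          = fun x => ((w.toList.count x : Nat) : Int) := by
        funext x
        rw [(PySem.List.sorted_perm w.toList (fun c => c) false).count_eq]
      rw [hcnt]
      apply pvFmax_congr
      intro v
      constructor
      · intro hv
        rcases List.mem_map.mp hv with ⟨y, hy, rfl⟩
        exact List.mem_map.mpr ⟨y, (PySem.List.mem_sorted _ _ _ _).mp hy, rfl⟩
      · intro hv
        rcases List.mem_map.mp hv with ⟨y, hy, rfl⟩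
        exact List.mem_map.mpr ⟨y, (PySem.List.mem_sorted _ _ _ _).mpr hy, rfl⟩

-- ===== outer loops agree =====

theorem pv_outer_fold (words : List String) : ∀ (st : Int × String), 1 ≤ st.1 →
    words.foldl (fun (st : Int × String) word =>
        let r := pvCountRepeat word
        if r > st.1 then (r, word) else st) st
      = words.foldl (fun (st : Int × String) word =>
        let r := pvCountRepeatAlt word
        if r > st.1 then (r, word) else st) st := by
  induction words with
  | nil => intro st h1; rfl
  | cons w ws ih =>
      intro st h1
      show ws.foldl _ (if pvCountRepeat w > st.1 then (pvCountRepeat w, w) else st)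
          = ws.foldl _ (if pvCountRepeatAlt w > st.1 then (pvCountRepeatAlt w, w) else st)
      by_cases hw : w.toList = []
      · have hA : pvCountRepeat w = 0 := by unfold pvCountRepeat; rw [hw]; rfl
        have hB : pvCountRepeatAlt w = 1 := by unfold pvCountRepeatAlt; rw [hw]; rfl
        rw [hA, hB, if_neg (by omega), if_neg (by omega)]
        exact ih st h1
      · have heq : pvCountRepeat w = pvCountRepeatAlt w :=
          (pv_countRepeat_eq_fmax w hw).trans (pv_countRepeatAlt_eq_fmax w hw).symm
        rw [heq]
        by_cases hgt : pvCountRepeatAlt w > st.1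
        · rw [if_pos hgt]
          exact ih _ (by omega)
        · rw [if_neg hgt]
          exact ih st h1

theorem pv_ports_agree (s : String) : word_with_highest_repeated_word s = word_with_highest_repeated_word_alt s :=
  congrArg (fun st : Int × String => if st.1 > 1 then st.2 else "")
    (pv_outer_fold (PySem.Str.split₀ s) (1, "") (by norm_num))

-- ===== VERDICT (by name: the statement is the Claim_ definition above) =====
theorem word_with_highest_repeated_word_spec : Claim_equal_word_with_highest_repeated_word := by
  intro s _ _
  unfold Spec_word_with_highest_repeated_word
  exact pv_ports_agree s
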